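-- pv_equiv track=rewrite | github.com/putetrekk/maestro-net | preprocessing.py | split_input_output
-- ===== SOURCE A (Python) =====
-- def split_input_output(all_data: list, words_per_section = 25):
-- 	inputs, outputs = [], []
-- 	for data in all_data:
-- 		sep = ' '
-- 		sectioned_notes = []
--
-- 		groups = data.split(sep)
-- 		while len(groups):
-- 			sectioned_notes.append(sep.join(groups[:words_per_section]))
-- 			groups = groups[words_per_section:]
--
-- 		for i in range(len(sectioned_notes) - 1):
-- 			inputs.append(sectioned_notes[i])
-- 			outputs.append(sectioned_notes[i + 1])
--
-- 	return inputs, outputs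
-- ===== SOURCE B (Python) =====
-- def split_input_output(all_data: list, words_per_section = 25):
-- 	inputs, outputs = [], []
-- 	for data in all_data:
-- 		words = data.split(' ')
-- 		sections = [' '.join(words[i:i + words_per_section])
-- 		            for i in range(0, len(words), words_per_section)]
-- 		inputs.extend(sections[:-1])
-- 		outputs.extend(sections[1:])
-- 	return inputs, outputs
-- ===== Notes on version B (the rewrite author's own statement) =====
-- stated objective: simpler
-- what changed: Replaced the while-loop that repeatedly re-slices the word list (groups = groups[wps:]) plus a second index loop pairing a built intermediate list by a single range-step comprehension over fixed offsets, pairing consecutive sections with two slices (sections[:-1]/sections[1:]).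
import Mathlib
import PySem

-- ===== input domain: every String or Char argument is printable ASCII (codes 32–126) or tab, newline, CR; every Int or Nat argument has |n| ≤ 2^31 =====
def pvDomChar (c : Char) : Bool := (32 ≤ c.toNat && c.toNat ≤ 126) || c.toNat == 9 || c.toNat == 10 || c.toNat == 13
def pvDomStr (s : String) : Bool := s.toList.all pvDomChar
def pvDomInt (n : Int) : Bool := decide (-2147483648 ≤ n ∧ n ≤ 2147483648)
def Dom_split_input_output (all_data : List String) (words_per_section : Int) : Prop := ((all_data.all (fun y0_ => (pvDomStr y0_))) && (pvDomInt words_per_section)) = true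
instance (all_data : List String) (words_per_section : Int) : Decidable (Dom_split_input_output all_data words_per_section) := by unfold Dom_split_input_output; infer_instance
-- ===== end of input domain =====

-- B replaces A's re-slicing while-loop and second pairing loop by one range-step comprehension
-- with slice pairing; proved equal to A whenever A terminates (wps ≥ 1 or no data).


-- ===== PORT A =====
-- A's `while len(groups):` loop, with fuel len(groups)+1: with wps ≥ 1 each iteration drops
-- ≥ 1 element, so the fuel is never exhausted inside Pre_ (for wps ≤ 0 Python A loops forever).
def pvChunkA (sep : String) (wps : Int) : Nat → List String → List String
  | 0, _ => []
  | fuel + 1, groups =>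
    if groups.length = 0 then []
    else PySem.Str.join sep (PySem.List.slice groups none (some wps)) ::
         pvChunkA sep wps fuel (PySem.List.slice groups (some wps) none)

def split_input_output (all_data : List String) (words_per_section : Int) : List String × List String :=
  all_data.foldl (fun acc data =>
      let sep := " "
      -- data.split(' '): sep is a nonempty literal, so split? is always `some`
      let groups := (PySem.Str.split? data sep).getD []
      let sectioned_notes := pvChunkA sep words_per_section (groups.length + 1) groups
      (PySem.List.pyRange 0 (PySem.List.len sectioned_notes - 1) 1).foldl
        (fun acc i => (acc.1 ++ [PySem.List.pyGetD sectioned_notes i ""],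
                       acc.2 ++ [PySem.List.pyGetD sectioned_notes (i + 1) ""])) acc)
    ([], [])

-- ===== PORT B =====
def split_input_output_alt (all_data : List String) (words_per_section : Int) : List String × List String :=
  all_data.foldl (fun acc data =>
      let words := (PySem.Str.split? data " ").getD []
      let sections := (PySem.List.pyRange 0 (PySem.List.len words) words_per_section).map
          (fun i => PySem.Str.join " " (PySem.List.slice words (some i) (some (i + words_per_section))))
      (acc.1 ++ PySem.List.slice sections none (some (-1)),
       acc.2 ++ PySem.List.slice sections (some 1) none))
    ([], [])

-- ===== PRECONDITION & SPEC =====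
-- Pre_ excludes only inputs on which A never returns: with words_per_section ≤ 0 and at least
-- one string present, A's `while` loop runs forever (groups never shrinks).
def Pre_split_input_output (all_data : List String) (words_per_section : Int) : Prop :=
  1 ≤ words_per_section ∨ all_data = []
instance (all_data : List String) (words_per_section : Int) : Decidable (Pre_split_input_output all_data words_per_section) := by unfold Pre_split_input_output; infer_instance
def pvWitness_split_input_output : List String × Int := (["a b c"], 2)

def Spec_split_input_output (all_data : List String) (words_per_section : Int) (out : List String × List String) : Prop := out = split_input_output_alt all_data words_per_section
instance (all_data : List String) (words_per_section : Int) (out : List String × List String) : Decidable (Spec_split_input_output all_data words_per_section out) := by unfold Spec_split_input_output; infer_instance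

-- ===== CLAIM (what is proved, stated in full; the proofs are below) =====
def Claim_equal_split_input_output : Prop := ∀ (all_data : List String) (words_per_section : Int), Dom_split_input_output all_data words_per_section → Pre_split_input_output all_data words_per_section → Spec_split_input_output all_data words_per_section (split_input_output all_data words_per_section)

-- ===== LEMMAS AND PROOFS =====

-- B's per-string section list, named for the proofs.
def pvSecs (wps : Int) (g : List String) : List String :=
  (PySem.List.pyRange 0 (PySem.List.len g) wps).map
    (fun i => PySem.Str.join " " (PySem.List.slice g (some i) (some (i + wps))))

theorem pvRange_nil_of_nonpos {wps b : Int} (hw : 0 < wps) (hb : b ≤ 0) :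
    PySem.List.pyRange 0 b wps = [] := by
  rw [PySem.List.pyRange_of_pos _ _ hw, if_neg (by omega)]
  simp

theorem pvRange_cons {wps b : Int} (hw : 0 < wps) (hb : 0 < b) :
    PySem.List.pyRange 0 b wps = 0 :: (PySem.List.pyRange 0 (b - wps) wps).map (· + wps) := by
  rw [PySem.List.pyRange_of_pos _ _ hw, PySem.List.pyRange_of_pos _ _ hw, if_pos (by omega)]
  have hdiv : (b - 0 + wps - 1) / wps = (b - 1) / wps + 1 := by
    rw [show b - 0 + wps - 1 = (b - 1) + 1 * wps by ring,
        Int.add_mul_ediv_right _ _ (by omega : wps ≠ 0)]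
  by_cases hlt : 0 < b - wps
  · rw [if_pos hlt]
    have h1 : (b - wps - 0 + wps - 1) / wps = (b - 1) / wps := by
      have : b - wps - 0 + wps - 1 = b - 1 := by ring
      rw [this]
    have h2 : 0 ≤ (b - 1) / wps := Int.ediv_nonneg (by omega) (by omega)
    rw [hdiv, h1]
    have : ((b - 1) / wps + 1).toNat = ((b - 1) / wps).toNat + 1 := by omega
    rw [this, List.range_succ_eq_map]
    simp [List.map_map, Function.comp]
    intro k _
    ring
  · rw [if_neg hlt]
    have h0 : (b - 1) / wps = 0 := Int.ediv_eq_zero_of_lt (by omega) (by omega)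
    rw [hdiv, h0]
    simp
theorem pvSecs_cons {wps : Int} (hw : 1 ≤ wps) {g : List String} (hg : g ≠ []) :
    pvSecs wps g =
      PySem.Str.join " " (g.take wps.toNat) :: pvSecs wps (g.drop wps.toNat) := by
  have hn : 0 < (g.length : Int) := by
    have := List.length_pos_iff.mpr hg
    exact_mod_cast this
  unfold pvSecs
  rw [PySem.List.len_eq, PySem.List.len_eq, pvRange_cons (by omega) hn]
  simp only [List.map_cons, List.map_map]
  congr 1
  · rw [PySem.List.slice_zero_start, zero_add, PySem.List.slice_to _ (by omega)]
  · by_cases hle : (g.length : Int) ≤ wps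
    · have hdrop : List.drop wps.toNat g = [] := List.drop_eq_nil_iff.mpr (by omega)
      rw [hdrop, pvRange_nil_of_nonpos (by omega : (0:Int) < wps) (by omega : (g.length : Int) - wps ≤ 0),
          pvRange_nil_of_nonpos (by omega : (0:Int) < wps) (by simp : ((List.length ([] : List String) : Int)) ≤ 0)]
      simp
    · have hlen : ((List.drop wps.toNat g).length : Int) = (g.length : Int) - wps := by
        simp [List.length_drop]; omega
      rw [hlen]
      refine List.map_congr_left ?_
      intro i hi
      have hi0 : 0 ≤ i := by
        rcases (PySem.List.mem_pyRange_iff_of_pos (by omega : (0:Int) < wps) i).mp hi with ⟨h1, _, _⟩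
        omega
      simp only [Function.comp]
      rw [PySem.List.slice_toNat _ (by omega) (by omega),
          PySem.List.slice_toNat _ (by omega) (by omega), List.drop_drop]
      have hA : ((i + wps) + wps).toNat - (i + wps).toNat = (i + wps).toNat - i.toNat := by omega
      have hB : (i + wps).toNat = wps.toNat + i.toNat := by omega
      rw [hA, hB]

theorem pvChunkA_eq {wps : Int} (hw : 1 ≤ wps) :
    ∀ (fuel : Nat) (g : List String), g.length < fuel →
      pvChunkA " " wps fuel g = pvSecs wps g := by
  intro fuel
  induction fuel with
  | zero => intro g h; omega
  | succ f ih =>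
    intro g h
    by_cases hg : g.length = 0
    · rw [pvChunkA, if_pos hg]
      have : g = [] := List.length_eq_zero_iff.mp hg
      subst this
      have hnil : PySem.List.pyRange 0 (PySem.List.len ([] : List String)) wps = [] := by
        rw [PySem.List.len_eq]
        exact pvRange_nil_of_nonpos (by omega) (by simp)
      unfold pvSecs
      rw [hnil]
      rfl
    · rw [pvChunkA, if_neg hg,
          PySem.List.slice_to _ (by omega : (0:Int) ≤ wps),
          PySem.List.slice_from _ (by omega : (0:Int) ≤ wps),
          ih _ (by have : 1 ≤ wps.toNat := by omega
                   have := List.length_drop (l := g) (i := wps.toNat)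
                   omega)]
      exact (pvSecs_cons hw (by intro hnil; exact hg (by simp [hnil]))).symm

theorem pvPairLoop_eq (s : List String) (acc : List String × List String) :
    (PySem.List.pyRange 0 (PySem.List.len s - 1) 1).foldl
      (fun acc i => (acc.1 ++ [PySem.List.pyGetD s i ""],
                     acc.2 ++ [PySem.List.pyGetD s (i + 1) ""])) acc
    = (acc.1 ++ s.dropLast, acc.2 ++ s.tail) := by
  rw [PySem.List.len_eq, PySem.List.pyRange_one, List.foldl_map]
  have hm : ((s.length : Int) - 1 - 0).toNat = s.length - 1 := by omega
  rw [hm]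
  have hstep : ∀ (a : List String × List String) (k : Nat),
      (a.1 ++ [PySem.List.pyGetD s (0 + (k : Int)) ""],
       a.2 ++ [PySem.List.pyGetD s (0 + (k : Int) + 1) ""])
      = (a.1 ++ [s.getD k ""], a.2 ++ [s.getD (k + 1) ""]) := by
    intro a k
    have h1 : (0 : Int) + (k : Int) = ((k : Nat) : Int) := by omega
    have h2 : (k : Int) + 1 = (((k + 1) : Nat) : Int) := by push_cast; ring
    rw [h1, h2, PySem.List.pyGetD_natCast, PySem.List.pyGetD_natCast]
  calc (List.range (s.length - 1)).foldl
        (fun a (k : Nat) => (a.1 ++ [PySem.List.pyGetD s (0 + (k : Int)) ""],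
                             a.2 ++ [PySem.List.pyGetD s (0 + (k : Int) + 1) ""])) acc
      = (List.range (s.length - 1)).foldl
        (fun a (k : Nat) => (a.1 ++ [s.getD k ""], a.2 ++ [s.getD (k + 1) ""])) acc := by
        exact PySem.List.foldl_congr_mem _ _ _ _ (fun a k _ => hstep a k)
    _ = (acc.1 ++ s.dropLast, acc.2 ++ s.tail) := by
        rcases acc with ⟨a, b⟩
        rw [PySem.List.foldl_prod_mk (fun x k => x ++ [s.getD k ""]) (fun x k => x ++ [s.getD (k + 1) ""]),
            PySem.List.foldl_append_singleton_eq_map, PySem.List.foldl_append_singleton_eq_map]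
        have h1 : (List.range (s.length - 1)).map (fun k => s.getD k "") = s.dropLast := by
          apply List.ext_getElem
          · simp
          · intro i h1 h2
            simp only [List.getElem_map, List.getElem_range]
            rw [List.getD_eq_getElem _ _ (by simp at h1 ⊢; omega), List.getElem_dropLast]
        have h2 : (List.range (s.length - 1)).map (fun k => s.getD (k + 1) "") = s.tail := by
          apply List.ext_getElem
          · simp
          · intro i h1 h2
            simp only [List.getElem_map, List.getElem_range]
            rw [List.getD_eq_getElem _ _ (by simp at h1 ⊢; omega), List.getElem_tail]
        rw [h1, h2]

-- ===== VERDICT (by name: the statement is the Claim_ definition above) =====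
theorem split_input_output_spec : Claim_equal_split_input_output := by
  intro all_data wps _ hpre
  unfold Spec_split_input_output
  rcases hpre with hw | hnil
  · unfold split_input_output split_input_output_alt
    apply Eq.symm
    apply PySem.List.foldl_congr_mem
    intro acc data _
    simp only []
    set g : List String := (PySem.Str.split? data " ").getD [] with hg
    rw [pvChunkA_eq hw (g.length + 1) g (by omega), pvPairLoop_eq,
        PySem.List.slice_to_neg_one, PySem.List.slice_from_one]
    rfl
  · subst hnil
    rfl
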